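-- pv_equiv track=rewrite | github.com/CGraciolli/Connect-4 | list_tools.py | find_n_cons
-- ===== SOURCE A (Python) =====
-- def find_n_cons(lista, needle, n):
--     """
--     returns True if neddle occurs n consecutive times in list, False otherwise
--     """
--     biggest_streak = 0
--     counter = 0
--     i = 0
--     while counter < n and i < len(lista):
--         if lista[i] == needle:
--             counter += 1
--         else:
--             biggest_streak = max(biggest_streak, counter)
--             counter = 0
--         i += 1
--     biggest_streak = max(biggest_streak, counter)
--     return biggest_streak >= n
-- ===== SOURCE B (Python) =====
-- def find_n_cons(lista, needle, n):
--     """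
--     returns True if needle occurs n consecutive times in list, False otherwise
--     """
--     if n <= 0:
--         return True
--     if n > len(lista):
--         return False
--     block = [needle] * n
--     return any(lista[i:i + n] == block for i in range(len(lista) - n + 1))
-- ===== Notes on version B (the rewrite author's own statement) =====
-- stated objective: alternative
-- what changed: Instead of counting run lengths with a streak counter, B precomputes the block [needle]*n and checks by sliding-window comparison whether it occurs as a contiguous slice of the list (n<=0 is trivially True).
import Mathlib
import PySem

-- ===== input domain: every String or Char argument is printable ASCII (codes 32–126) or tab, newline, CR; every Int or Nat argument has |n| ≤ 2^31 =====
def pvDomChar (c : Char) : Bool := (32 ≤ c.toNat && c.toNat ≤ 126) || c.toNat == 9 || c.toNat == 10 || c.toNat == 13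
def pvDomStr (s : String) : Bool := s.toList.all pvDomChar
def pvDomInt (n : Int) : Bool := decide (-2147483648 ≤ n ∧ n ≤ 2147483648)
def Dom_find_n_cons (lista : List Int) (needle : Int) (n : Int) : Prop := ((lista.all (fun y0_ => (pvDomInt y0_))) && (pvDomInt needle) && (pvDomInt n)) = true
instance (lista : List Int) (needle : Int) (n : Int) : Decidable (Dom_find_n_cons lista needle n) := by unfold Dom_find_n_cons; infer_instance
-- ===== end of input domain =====

-- B replaces A's streak counter by a sliding-window comparison against the block [needle]*n (alternative algorithm, same return value).

-- ===== PORT A =====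
-- A's while loop: state (biggest_streak, counter), loop condition 'counter < n and i < len(lista)';
-- advancing i over the list is the structural recursion.
def findLoopA (needle n : Int) : List Int → Int → Int → Bool
  | [], biggest, counter => decide (max biggest counter ≥ n)
  | x :: xs, biggest, counter =>
    if counter < n then
      if x = needle then findLoopA needle n xs biggest (counter + 1)
      else findLoopA needle n xs (max biggest counter) 0
    else decide (max biggest counter ≥ n)

def find_n_cons (lista : List Int) (needle : Int) (n : Int) : Bool :=
  findLoopA needle n lista 0 0

-- ===== PORT B =====
-- Source B: if n <= 0: True; block = [needle]*n; any(lista[i:i+n] == block for i in range(len(lista)-n+1))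
def find_n_cons_alt (lista : List Int) (needle : Int) (n : Int) : Bool :=
  if n ≤ 0 then true
  else if (lista.length : Int) < n then false
  else
    let block := List.replicate n.toNat needle
    (PySem.List.pyRange 0 ((lista.length : Int) - n + 1) 1).any
      (fun i => PySem.List.slice lista (some i) (some (i + n)) == block)

-- ===== PRECONDITION & SPEC =====
def Spec_find_n_cons (lista : List Int) (needle : Int) (n : Int) (out : Bool) : Prop := out = find_n_cons_alt lista needle n
instance (lista : List Int) (needle : Int) (n : Int) (out : Bool) : Decidable (Spec_find_n_cons lista needle n out) := by unfold Spec_find_n_cons; infer_instance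

-- ===== CLAIM (what is proved, stated in full; the proofs are below) =====
def Claim_equal_find_n_cons : Prop := ∀ (lista : List Int) (needle : Int) (n : Int), Dom_find_n_cons lista needle n → Spec_find_n_cons lista needle n (find_n_cons lista needle n)

-- ===== LEMMAS AND PROOFS =====

-- reference pair: (length of the leading needle-run, max needle-run length) of a list
def lb (needle : Int) : List Int → Int × Int
  | [] => (0, 0)
  | x :: xs =>
    let p := lb needle xs
    if x = needle then (p.1 + 1, max (p.1 + 1) p.2) else (0, p.2)

theorem lb_cons_pos (needle x : Int) (xs : List Int) (hx : x = needle) :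
    lb needle (x :: xs) = ((lb needle xs).1 + 1, max ((lb needle xs).1 + 1) (lb needle xs).2) := by
  simp [lb, hx]

theorem lb_cons_neg (needle x : Int) (xs : List Int) (hx : ¬ x = needle) :
    lb needle (x :: xs) = (0, (lb needle xs).2) := by
  simp [lb, hx]

theorem lb_le_length (needle : Int) (l : List Int) :
    (lb needle l).1 ≤ (l.length : Int) ∧ (lb needle l).2 ≤ (l.length : Int) := by
  induction l with
  | nil => simp [lb]
  | cons x xs ih =>
    by_cases hx : x = needle
    · rw [lb_cons_pos needle x xs hx]; simp only [List.length_cons]; push_cast; omega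
    · rw [lb_cons_neg needle x xs hx]; simp only [List.length_cons]; push_cast; omega

theorem lb_bounds (needle : Int) (l : List Int) :
    0 ≤ (lb needle l).1 ∧ (lb needle l).1 ≤ (lb needle l).2 := by
  induction l with
  | nil => simp [lb]
  | cons x xs ih =>
    by_cases hx : x = needle
    · rw [lb_cons_pos needle x xs hx]; simp; omega
    · rw [lb_cons_neg needle x xs hx]; simp; omega

-- A-side loop characterisation via lb
theorem loopA_lb (needle n : Int) (l : List Int) :
    ∀ biggest counter : Int, 0 ≤ counter →
      findLoopA needle n l biggest counter =
        decide (n ≤ max biggest (max (counter + (lb needle l).1) (lb needle l).2)) := by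
  induction l with
  | nil =>
    intro b c hc
    simp only [findLoopA, lb]
    exact decide_eq_decide.mpr (by omega)
  | cons x xs ih =>
    intro b c hc
    have hbnd := lb_bounds needle xs
    by_cases hcn : c < n
    · by_cases hx : x = needle
      · rw [lb_cons_pos needle x xs hx]
        simp only [findLoopA, if_pos hcn, if_pos hx, ih b (c + 1) (by omega)]
        exact decide_eq_decide.mpr (by omega)
      · rw [lb_cons_neg needle x xs hx]
        simp only [findLoopA, if_pos hcn, if_neg hx, ih (max b c) 0 (le_refl 0)]
        exact decide_eq_decide.mpr (by omega)
    · simp only [findLoopA, if_neg hcn]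
      have h1 := lb_bounds needle (x :: xs)
      exact decide_eq_decide.mpr (by omega)

-- leading run: take k is the needle-block iff the leading run is at least k
theorem take_eq_replicate_iff (needle : Int) (k : Nat) (l : List Int) :
    l.take k = List.replicate k needle ↔ (k : Int) ≤ (lb needle l).1 := by
  induction k generalizing l with
  | zero => simpa using (lb_bounds needle l).1
  | succ k ih =>
    cases l with
    | nil =>
      simp only [List.take_nil, lb]
      constructor
      · intro h
        exact absurd h.symm (by simp)
      · intro h
        exfalso; push_cast at h; omega
    | cons x xs =>
      by_cases hx : x = needle
      · rw [lb_cons_pos needle x xs hx]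
        simp only [List.take_succ_cons, List.replicate_succ, List.cons_eq_cons, ih, hx, true_and]
        push_cast; omega
      · rw [lb_cons_neg needle x xs hx]
        simp only [List.take_succ_cons, List.replicate_succ, List.cons_eq_cons, ih, hx, false_and]
        constructor
        · exact False.elim
        · intro h; exfalso; push_cast at h; omega

-- window existence: some window of length k is the needle-block iff the max run is at least k
theorem window_iff (needle : Int) (k : Nat) (hk : 1 ≤ k) (l : List Int) :
    (∃ i : Nat, (l.drop i).take k = List.replicate k needle) ↔ (k : Int) ≤ (lb needle l).2 := by
  induction l with
  | nil =>
    simp only [List.drop_nil, List.take_nil, lb]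
    constructor
    · rintro ⟨i, h⟩
      exfalso
      have := congrArg List.length h
      simp only [List.length_nil, List.length_replicate] at this
      omega
    · intro h; exfalso; omega
  | cons x xs ih =>
    have hbnd := lb_bounds needle xs
    have hsplit : (∃ i : Nat, ((x :: xs).drop i).take k = List.replicate k needle) ↔
        ((x :: xs).take k = List.replicate k needle ∨ ∃ j : Nat, (xs.drop j).take k = List.replicate k needle) := by
      constructor
      · rintro ⟨i, h⟩
        cases i with
        | zero => exact Or.inl h
        | succ j => exact Or.inr ⟨j, h⟩
      · rintro (h | ⟨j, h⟩)
        · exact ⟨0, h⟩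
        · exact ⟨j + 1, h⟩
    rw [hsplit, ih, take_eq_replicate_iff]
    by_cases hx : x = needle
    · rw [lb_cons_pos needle x xs hx]; omega
    · rw [lb_cons_neg needle x xs hx]; omega
-- ===== VERDICT (by name: the statement is the Claim_ definition above) =====
theorem find_n_cons_spec : Claim_equal_find_n_cons := by
  intro lista needle n _
  unfold Spec_find_n_cons find_n_cons find_n_cons_alt
  rw [loopA_lb needle n lista 0 0 (le_refl 0)]
  have hbnd := lb_bounds needle lista
  by_cases hn : n ≤ 0
  · simp only [if_pos hn]
    exact decide_eq_true (by omega)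
  · rw [if_neg hn]
    by_cases hlen : (lista.length : Int) < n
    · rw [if_pos hlen]
      have := lb_le_length needle lista
      exact decide_eq_false (by omega)
    rw [if_neg hlen]
    have hk1 : 1 ≤ n.toNat := by omega
    have hkn : (n.toNat : Int) = n := Int.toNat_of_nonneg (by omega)
    rw [Bool.eq_iff_iff, decide_eq_true_iff, List.any_eq_true]
    constructor
    · -- A true → some window matches
      intro h
      have h' : (n.toNat : Int) ≤ (lb needle lista).2 := by omega
      obtain ⟨i, hi⟩ := (window_iff needle n.toNat hk1 lista).mpr h'
      have hlen : n.toNat ≤ lista.length - i := by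
        have := congrArg List.length hi
        simp only [List.length_take, List.length_drop, List.length_replicate] at this
        omega
      refine ⟨(i : Int), ?_, ?_⟩
      · rw [PySem.List.mem_pyRange_one]
        constructor
        · positivity
        · omega
      · rw [beq_iff_eq, PySem.List.slice_toNat lista (by positivity) (by omega)]
        have h1 : ((i : Int) + n).toNat - (i : Int).toNat = n.toNat := by omega
        have h2 : ((i : Int)).toNat = i := by omega
        rw [h1, h2, hi]
    · -- some window matches → A true
      rintro ⟨i, hmem, hp⟩
      rw [PySem.List.mem_pyRange_one] at hmem
      rw [beq_iff_eq, PySem.List.slice_toNat lista hmem.1 (by omega)] at hp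
      have h1 : ((i : Int) + n).toNat - i.toNat = n.toNat := by omega
      rw [h1] at hp
      have : (n.toNat : Int) ≤ (lb needle lista).2 :=
        (window_iff needle n.toNat hk1 lista).mp ⟨i.toNat, hp⟩
      omega
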